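-- pv_equiv track=rewrite | github.com/eomsteve/algo_study | johoh0/10th_week/pg_wc_MinRect.py | solution
-- ===== SOURCE A (Python) =====
-- def solution(sizes):
--     long = []  # 긴 부분 저장
--     short = []  # 짧은 부분 저장
--     for i in range(len(sizes)):
--         if sizes[i][0] > sizes[i][1]:  # 가로가 긴 경우
--             long.append(sizes[i][0])
--             short.append(sizes[i][1])
--         else:  # 세로가 긴 경우
--             long.append(sizes[i][1])
--             short.append(sizes[i][0])
--
--     answer = max(long) * max(short)
--     return answer
-- ===== SOURCE B (Python) =====
-- def solution(sizes):
--     # Divide and conquer: recursively split the card list in half, each half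
--     # yielding (max long side, max short side); combine with max, multiply at the top.
--     if not sizes:
--         raise ValueError("solution() arg is an empty sequence")
--
--     def go(cards):
--         if len(cards) == 1:
--             w, h = cards[0][0], cards[0][1]
--             return (max(w, h), min(w, h))
--         mid = len(cards) // 2
--         l1, s1 = go(cards[:mid])
--         l2, s2 = go(cards[mid:])
--         return (max(l1, l2), max(s1, s2))
--
--     L, S = go(sizes)
--     return L * S
-- ===== Notes on version B (the rewrite author's own statement) =====
-- stated objective: alternative
-- what changed: B replaces A's iterative build-two-lists-then-max pass by a recursive divide-and-conquer: the card list is split in halves, each half returns the pair (max long side, max short side), pairs are combined with max and multiplied at the root.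
import Mathlib
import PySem

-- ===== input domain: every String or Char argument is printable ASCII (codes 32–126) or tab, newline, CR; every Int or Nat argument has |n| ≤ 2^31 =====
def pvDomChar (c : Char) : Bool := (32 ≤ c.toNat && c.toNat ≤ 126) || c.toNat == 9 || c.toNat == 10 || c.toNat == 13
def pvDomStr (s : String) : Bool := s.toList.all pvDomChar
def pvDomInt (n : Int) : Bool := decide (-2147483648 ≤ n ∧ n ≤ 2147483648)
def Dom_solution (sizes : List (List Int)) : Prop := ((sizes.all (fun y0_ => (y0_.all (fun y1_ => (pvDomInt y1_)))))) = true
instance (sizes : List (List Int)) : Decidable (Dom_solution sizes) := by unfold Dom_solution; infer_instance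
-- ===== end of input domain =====

-- B replaces A's build-two-lists-then-max pass by a recursive divide-and-conquer over halves; return values agree on Pre_.

-- ===== PORT A =====
-- for i in range(len(sizes)): append long/short; then max(long) * max(short).
-- pyGetD with default is only a totalisation: Pre_ guarantees every index is in range.
def solution (sizes : List (List Int)) : Int :=
  let p := (PySem.List.pyRange 0 (PySem.List.len sizes) 1).foldl
    (fun (p : List Int × List Int) i =>
      let row := PySem.List.pyGetD sizes i []
      let a := PySem.List.pyGetD row 0 0
      let b := PySem.List.pyGetD row 1 0
      if a > b then (p.1 ++ [a], p.2 ++ [b]) else (p.1 ++ [b], p.2 ++ [a]))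
    ([], [])
  -- max(long) * max(short); .getD 0 totalises the empty-list ValueError, excluded by Pre_
  (PySem.List.max? p.1 (fun x => x)).getD 0 * (PySem.List.max? p.2 (fun x => x)).getD 0

-- ===== PORT B =====
-- def go(cards): length-1 base gives (max(w,h), min(w,h)); otherwise split at mid = len//2,
-- recurse on cards[:mid] and cards[mid:], combine componentwise with max.
-- Python's go is only ever called on nonempty lists; on [] the base row reads give the
-- pyGetD defaults (a totalisation, unreachable under Pre_), keeping the recursion well-founded.
def solGo (cards : List (List Int)) : Int × Int :=
  if cards.length ≤ 1 then
    let r := PySem.List.pyGetD cards 0 []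
    let w := PySem.List.pyGetD r 0 0
    let h := PySem.List.pyGetD r 1 0
    (max w h, min w h)
  else
    let mid : Nat := cards.length / 2
    let p1 := solGo (PySem.List.slice cards none (some (mid : Int)))
    let p2 := solGo (PySem.List.slice cards (some (mid : Int)) none)
    (max p1.1 p2.1, max p1.2 p2.2)
termination_by cards.length
decreasing_by
  · rw [PySem.List.slice_to_natCast]; simp; omega
  · rw [PySem.List.slice_from_natCast]; simp; omega

-- if not sizes: raise ValueError  (totalised to 0, excluded by Pre_); else L * S from go.
def solution_alt (sizes : List (List Int)) : Int :=
  if sizes = [] then 0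
  else
    let p := solGo sizes
    p.1 * p.2

-- ===== PRECONDITION & SPEC =====
-- Pre_ excludes exactly the inputs where A raises: the empty list (max() of an empty list,
-- ValueError) and rows with fewer than two entries (IndexError).
def Pre_solution (sizes : List (List Int)) : Prop :=
  sizes ≠ [] ∧ ∀ r ∈ sizes, 2 ≤ r.length
instance (sizes : List (List Int)) : Decidable (Pre_solution sizes) := by unfold Pre_solution; infer_instance
def pvWitness_solution : List (List Int) := [[3, 5], [7, 2]]

def Spec_solution (sizes : List (List Int)) (out : Int) : Prop := out = solution_alt sizes
instance (sizes : List (List Int)) (out : Int) : Decidable (Spec_solution sizes out) := by unfold Spec_solution; infer_instance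

-- ===== CLAIM =====
def Claim_equal_solution : Prop := ∀ (sizes : List (List Int)), Dom_solution sizes → Pre_solution sizes → Spec_solution sizes (solution sizes)

-- ===== LEMMAS AND PROOFS =====

def pvHi (r : List Int) : Int :=
  let w := PySem.List.pyGetD r 0 0
  let h := PySem.List.pyGetD r 1 0
  if w > h then w else h

def pvLo (r : List Int) : Int :=
  let w := PySem.List.pyGetD r 0 0
  let h := PySem.List.pyGetD r 1 0
  if w > h then h else w

-- max of a nonempty list (0 on [], never used there)
def pvM (l : List Int) : Int :=
  match l with
  | [] => 0
  | x :: xs => xs.foldl max x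

theorem pvFoldl_max_max (l : List Int) (m y : Int) :
    l.foldl max (max m y) = max m (l.foldl max y) := by
  induction l generalizing y with
  | nil => rfl
  | cons z zs ih => simp only [List.foldl_cons, max_assoc, ih]

theorem pvM_append (a b : List Int) (ha : a ≠ []) (hb : b ≠ []) :
    pvM (a ++ b) = max (pvM a) (pvM b) := by
  cases a with
  | nil => exact absurd rfl ha
  | cons x xs =>
    cases b with
    | nil => exact absurd rfl hb
    | cons y ys =>
      simp only [pvM, List.cons_append, List.foldl_append, List.foldl_cons]
      exact pvFoldl_max_max ys _ y

-- A's loop builds exactly (map pvHi, map pvLo)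
theorem pvA_fold (sizes : List (List Int)) (l s : List Int) :
    sizes.foldl
      (fun (p : List Int × List Int) row =>
        let a := PySem.List.pyGetD row 0 0
        let b := PySem.List.pyGetD row 1 0
        if a > b then (p.1 ++ [a], p.2 ++ [b]) else (p.1 ++ [b], p.2 ++ [a]))
      (l, s) = (l ++ sizes.map pvHi, s ++ sizes.map pvLo) := by
  induction sizes generalizing l s with
  | nil => simp
  | cons r t ih =>
    simp only [List.foldl_cons, List.map_cons, pvHi, pvLo]
    by_cases h : PySem.List.pyGetD r 0 0 > PySem.List.pyGetD r 1 0 <;>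
      simp [h, ih]

theorem pvA_eval (sizes : List (List Int)) :
    (PySem.List.pyRange 0 (PySem.List.len sizes) 1).foldl
      (fun (p : List Int × List Int) i =>
        let row := PySem.List.pyGetD sizes i []
        let a := PySem.List.pyGetD row 0 0
        let b := PySem.List.pyGetD row 1 0
        if a > b then (p.1 ++ [a], p.2 ++ [b]) else (p.1 ++ [b], p.2 ++ [a]))
      ([], []) = (sizes.map pvHi, sizes.map pvLo) := by
  rw [PySem.List.foldl_pyRange_zero_pyGetD sizes []
      (fun (p : List Int × List Int) (row : List Int) =>
        let a := PySem.List.pyGetD row 0 0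
        let b := PySem.List.pyGetD row 1 0
        if a > b then (p.1 ++ [a], p.2 ++ [b]) else (p.1 ++ [b], p.2 ++ [a]))
      ([], [])]
  exact pvA_fold sizes [] []

theorem pvA_closed (sizes : List (List Int)) (h : sizes ≠ []) :
    solution sizes = pvM (sizes.map pvHi) * pvM (sizes.map pvLo) := by
  unfold solution
  rw [pvA_eval]
  cases sizes with
  | nil => exact absurd rfl h
  | cons r t =>
    simp only [List.map_cons, PySem.List.max?_id_cons, Option.getD_some, pvM]

-- B's divide and conquer computes the same pair of maxima
theorem pvGo_spec (cards : List (List Int)) (h : cards ≠ []) :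
    solGo cards = (pvM (cards.map pvHi), pvM (cards.map pvLo)) := by
  induction cards using solGo.induct with
  | case1 cards hle =>
    cases cards with
    | nil => exact absurd rfl h
    | cons r t =>
      cases t with
      | nil =>
        rw [solGo, if_pos (by simp : ([r] : List (List Int)).length ≤ 1)]
        have hr : PySem.List.pyGetD [r] 0 ([] : List Int) = r := rfl
        simp only [hr, pvM, List.map_cons, List.map_nil, List.foldl_nil, pvHi, pvLo]
        by_cases hc : PySem.List.pyGetD r 0 0 > PySem.List.pyGetD r 1 0
        · simp [hc, max_eq_left hc.le, min_eq_right hc.le]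
        · rw [not_lt] at hc
          simp [not_lt.mpr hc, max_eq_right hc, min_eq_left hc]
      | cons r2 t2 => simp at hle
  | case2 cards hgt mid ih1 ih2 =>
    rw [solGo, if_neg hgt]
    simp only [PySem.List.slice_to_natCast, PySem.List.slice_from_natCast] at ih1 ih2 ⊢
    have h1 : cards.take (cards.length / 2) ≠ [] := by
      intro he; rw [List.take_eq_nil_iff] at he
      rcases he with h' | h' <;> first | omega | exact h h'
    have h2 : cards.drop (cards.length / 2) ≠ [] := by
      intro he; rw [List.drop_eq_nil_iff] at he; omega
    have key : ∀ f : List Int → Int, pvM (cards.map f) =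
        max (pvM ((cards.take (cards.length / 2)).map f))
            (pvM ((cards.drop (cards.length / 2)).map f)) := by
      intro f
      conv_lhs => rw [← List.take_append_drop (cards.length / 2) cards]
      rw [List.map_append, pvM_append _ _ (by simpa using h1) (by simpa using h2)]
    rw [ih1 h1, ih2 h2, key pvHi, key pvLo]

-- ===== VERDICT =====
theorem solution_spec : Claim_equal_solution := by
  intro sizes _ hpre
  show solution sizes = solution_alt sizes
  rw [pvA_closed sizes hpre.1]
  unfold solution_alt
  rw [if_neg hpre.1, pvGo_spec sizes hpre.1]
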